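-- pv_equiv track=rewrite | github.com/zadacka/advent_of_code_2024 | day22.py | get_most_bananas
-- ===== SOURCE A (Python) =====
-- from collections import deque, defaultdict
--
-- def mix(a, b):
--     """ Bitwise XOR"""
--     return a ^ b
--
-- def prune(a):
--     return a % 16777216
--
-- def advance(a):
--     a = prune(mix(a, a * 64))
--     a = prune(mix(a, a // 32))
--     a = prune(mix(a, a * 2048))
--     return a
--
-- def get_most_bananas(secrets):
--     all_patterns = defaultdict(int)
--     for secret_number in secrets:
--         patterns = dict()
--         window = deque(maxlen=4)
--         for _ in range(2000):
--             previous_number = secret_number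
--             secret_number = advance(secret_number)
--             diff = int(str(secret_number)[-1]) - int(str(previous_number)[-1])
--             window.append(diff)
--             if len(window) == 4:
--                 if tuple(window) not in patterns:
--                     patterns[tuple(window)] = int(str(secret_number)[-1])
--         for pattern, value in patterns.items():
--             all_patterns[pattern] += value
--     max_value = max(all_patterns.values())
--     best_pattern = {k: v for k, v in all_patterns.items() if v == max_value}
--     return best_pattern
-- ===== SOURCE B (Python) =====
-- from collections import defaultdict
--
-- def mix(a, b):
--     return a ^ b
--
-- def prune(a):
--     return a % 16777216
--
-- def advance(a):
--     a = prune(mix(a, a * 64))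
--     a = prune(mix(a, a // 32))
--     a = prune(mix(a, a * 2048))
--     return a
--
-- def get_most_bananas(secrets):
--     all_patterns = defaultdict(int)
--     for secret in secrets:
--         # first pass: precompute the whole price (last-digit) sequence
--         prices = [int(str(secret)[-1])]
--         s = secret
--         for _ in range(2000):
--             s = advance(s)
--             prices.append(int(str(s)[-1]))
--         # second pass: first occurrence of each 4-diff pattern, by indexing
--         local = {}
--         for i in range(4, len(prices)):
--             key = (prices[i - 3] - prices[i - 4], prices[i - 2] - prices[i - 3],
--                    prices[i - 1] - prices[i - 2], prices[i] - prices[i - 1])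
--             if key not in local:
--                 local[key] = prices[i]
--         for pattern, value in local.items():
--             all_patterns[pattern] += value
--     max_value = max(all_patterns.values())
--     return {k: v for k, v in all_patterns.items() if v == max_value}
-- ===== Notes on version B (the rewrite author's own statement) =====
-- stated objective: alternative
-- what changed: A streams each secret once with a deque(maxlen=4) window and records patterns on the fly; B first precomputes the full 2001-entry price list per secret, then finds first-occurrence 4-diff patterns in a separate index scan over that list.
import Mathlib
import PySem

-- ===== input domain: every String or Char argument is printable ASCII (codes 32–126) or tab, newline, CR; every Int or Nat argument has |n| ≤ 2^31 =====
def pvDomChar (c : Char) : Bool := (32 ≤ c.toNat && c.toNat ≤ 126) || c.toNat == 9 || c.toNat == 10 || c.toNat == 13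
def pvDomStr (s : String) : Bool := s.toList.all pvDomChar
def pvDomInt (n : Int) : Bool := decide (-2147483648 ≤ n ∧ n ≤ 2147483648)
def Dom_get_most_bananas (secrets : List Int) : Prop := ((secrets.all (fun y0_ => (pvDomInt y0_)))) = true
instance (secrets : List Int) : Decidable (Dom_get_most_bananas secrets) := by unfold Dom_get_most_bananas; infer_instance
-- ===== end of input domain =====

-- B replaces A's streaming deque+dict inner loop by a precompute-all-prices pass followed by an
-- index scan over the price list (objective: alternative decomposition, same results).

-- ===== PORT A =====
-- shared module helpers (identical code in Source A and Source B)
def pyMix (a b : Int) : Int := PySem.Int.bxor a b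

def pyPrune (a : Int) : Int := PySem.Int.mod a 16777216

def pyAdvance (a : Int) : Int :=
  let a1 := pyPrune (pyMix a (a * 64))
  let a2 := pyPrune (pyMix a1 (PySem.Int.floordiv a1 32))
  pyPrune (pyMix a2 (a2 * 2048))

-- int(str(x)[-1]); str(x) is never empty and its last char is always a digit, so the defaults never fire
def pyLastDigit (x : Int) : Int :=
  (PySem.Int.ofChars? [(PySem.Str.pyGet? (PySem.Int.toStr x) (-1)).getD '0']).getD 0

-- Python dicts here hold ~2000*len(secrets) entries, which an interpreted association list
-- cannot sustain in evaluation, so both ports share a CPython-style dict: an insertion-ordered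
-- entry array plus a hash index (exactly a Python dict's data layout; items/values read the
-- entry array in insertion order).
def pvDictEmpty : Array ((List Int) × Int) × Std.HashMap (List Int) Nat := (#[], ∅)

-- Python 'if k not in d: d[k] = v'
def pvDictSetIfAbsent (d : Array ((List Int) × Int) × Std.HashMap (List Int) Nat)
    (k : List Int) (v : Int) : Array ((List Int) × Int) × Std.HashMap (List Int) Nat :=
  match d.2[k]? with
  | some _ => d
  | none => (d.1.push (k, v), d.2.insert k d.1.size)

-- Python 'd[k] += v' on a defaultdict(int)
def pvDictAddTo (d : Array ((List Int) × Int) × Std.HashMap (List Int) Nat)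
    (k : List Int) (v : Int) : Array ((List Int) × Int) × Std.HashMap (List Int) Nat :=
  match d.2[k]? with
  | some i => (d.1.setIfInBounds i (k, (d.1[i]?.map (fun p => p.2)).getD 0 + v), d.2)
  | none => (d.1.push (k, v), d.2.insert k d.1.size)

-- A's inner loop: 2000 steps maintaining (secret, deque-window, first-occurrence dict)
def aInner (secret : Int) : Array ((List Int) × Int) × Std.HashMap (List Int) Nat :=
  ((PySem.List.pyRange 0 2000 1).foldl
    (fun (st : Int × List Int × (Array ((List Int) × Int) × Std.HashMap (List Int) Nat)) _ =>
      let prev := st.1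
      let sec := pyAdvance prev
      let diff := pyLastDigit sec - pyLastDigit prev
      let w0 := st.2.1 ++ [diff]
      let w := if 4 < w0.length then w0.tail else w0    -- deque(maxlen=4) append
      let pats := if w.length == 4 then
          pvDictSetIfAbsent st.2.2 w (pyLastDigit sec)  -- if tuple(window) not in patterns: patterns[...] = ...
        else st.2.2
      (sec, w, pats))
    (secret, ([] : List Int), pvDictEmpty)).2.2

def get_most_bananas (secrets : List Int) : List (List Int × Int) :=
  let all := secrets.foldl
    (fun all secret =>
      (aInner secret).1.toList.foldl (fun all pv => pvDictAddTo all pv.1 pv.2) all)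
    pvDictEmpty
  let items := all.1.toList
  let maxv := (PySem.List.max? (items.map (fun kv => kv.2)) (fun v => v)).getD 0   -- max() raises on []; excluded by Pre_
  items.filter (fun kv => kv.2 == maxv)

-- ===== PORT B =====
-- pass 1: the full 2001-entry price (last-digit) list
def bPrices (secret : Int) : List Int :=
  ((PySem.List.pyRange 0 2000 1).foldl
    (fun (st : List Int × Int) _ =>
      let t := pyAdvance st.2
      (st.1 ++ [pyLastDigit t], t))
    ([pyLastDigit secret], secret)).1

-- pass 2: index scan computing each 4-diff pattern from the list
def bLocal (prices : List Int) : Array ((List Int) × Int) × Std.HashMap (List Int) Nat :=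
  (PySem.List.pyRange 4 (prices.length : Int) 1).foldl
    (fun pats i =>
      let key := [PySem.List.pyGetD prices (i-3) 0 - PySem.List.pyGetD prices (i-4) 0,
                  PySem.List.pyGetD prices (i-2) 0 - PySem.List.pyGetD prices (i-3) 0,
                  PySem.List.pyGetD prices (i-1) 0 - PySem.List.pyGetD prices (i-2) 0,
                  PySem.List.pyGetD prices i 0 - PySem.List.pyGetD prices (i-1) 0]
      pvDictSetIfAbsent pats key (PySem.List.pyGetD prices i 0))
    pvDictEmpty

def get_most_bananas_alt (secrets : List Int) : List (List Int × Int) :=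
  let all := secrets.foldl
    (fun all secret =>
      (bLocal (bPrices secret)).1.toList.foldl (fun all pv => pvDictAddTo all pv.1 pv.2) all)
    pvDictEmpty
  let items := all.1.toList
  let maxv := (PySem.List.max? (items.map (fun kv => kv.2)) (fun v => v)).getD 0
  items.filter (fun kv => kv.2 == maxv)

-- ===== PRECONDITION & SPEC =====
-- On secrets = [] Python's max() raises ValueError (in A and in B alike); that is the only exclusion.
def Pre_get_most_bananas (secrets : List Int) : Prop := secrets ≠ []
instance (secrets : List Int) : Decidable (Pre_get_most_bananas secrets) := by unfold Pre_get_most_bananas; infer_instance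

def pvWitness_get_most_bananas : List Int := ([1])

def Spec_get_most_bananas (secrets : List Int) (out : List (List Int × Int)) : Prop := out = get_most_bananas_alt secrets
instance (secrets : List Int) (out : List (List Int × Int)) : Decidable (Spec_get_most_bananas secrets out) := by unfold Spec_get_most_bananas; infer_instance

-- ===== CLAIM (what is proved, stated in full; the proofs are below) =====
def Claim_equal_get_most_bananas : Prop := ∀ (secrets : List Int), Dom_get_most_bananas secrets → Pre_get_most_bananas secrets → Spec_get_most_bananas secrets (get_most_bananas secrets)

-- ===== LEMMAS AND PROOFS =====

-- k-th iterate of pyAdvance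
def iterAdv (s : Int) : Nat → Int
  | 0 => s
  | k+1 => pyAdvance (iterAdv s k)

-- price (last digit) after k steps
def dg (s : Int) (k : Nat) : Int := pyLastDigit (iterAdv s k)

-- k-th difference (k ≥ 1)
def df (s : Int) (k : Nat) : Int := dg s k - dg s (k-1)

-- the 4-diff pattern ending at step j (j ≥ 4)
def keyOf (s : Int) (j : Nat) : List Int := [df s (j-3), df s (j-2), df s (j-1), df s j]

-- contents of A's deque after k steps
def winSpec (s : Int) : Nat → List Int
  | 0 => []
  | 1 => [df s 1]
  | 2 => [df s 1, df s 2]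
  | 3 => [df s 1, df s 2, df s 3]
  | (m+4) => keyOf s (m+4)

def patsStep (s : Int) (j : Nat) (d : Array ((List Int) × Int) × Std.HashMap (List Int) Nat) :
    Array ((List Int) × Int) × Std.HashMap (List Int) Nat :=
  pvDictSetIfAbsent d (keyOf s j) (dg s j)

-- first-occurrence dict after k steps
def patsSpec (s : Int) : Nat → Array ((List Int) × Int) × Std.HashMap (List Int) Nat
  | 0 => pvDictEmpty
  | k+1 => if k+1 < 4 then pvDictEmpty else patsStep s (k+1) (patsSpec s k)

-- invariant of A's inner fold
theorem aFold_spec (s : Int) (n : Nat) :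
    (PySem.List.pyRange 0 (n : Int) 1).foldl
      (fun (st : Int × List Int × (Array ((List Int) × Int) × Std.HashMap (List Int) Nat)) _ =>
        let prev := st.1
        let sec := pyAdvance prev
        let diff := pyLastDigit sec - pyLastDigit prev
        let w0 := st.2.1 ++ [diff]
        let w := if 4 < w0.length then w0.tail else w0
        let pats := if w.length == 4 then
            pvDictSetIfAbsent st.2.2 w (pyLastDigit sec)
          else st.2.2
        (sec, w, pats))
      (s, ([] : List Int), pvDictEmpty)
    = (iterAdv s n, winSpec s n, patsSpec s n) := by
  induction n with
  | zero => simp [PySem.List.pyRange_one_eq_nil, iterAdv, winSpec, patsSpec]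
  | succ k ih =>
    have hcast : ((k+1 : Nat) : Int) = (k : Int) + 1 := by push_cast; ring
    rw [hcast, PySem.List.pyRange_one_succ_right (by positivity), List.foldl_append, ih]
    rcases Nat.lt_or_ge k 4 with h | h
    · interval_cases k <;> simp [winSpec, patsSpec, keyOf, patsStep, df, dg, iterAdv]
    · obtain ⟨m, rfl⟩ : ∃ m, k = m + 4 := ⟨k - 4, by omega⟩
      simp only [List.foldl_cons, List.foldl_nil]
      show _ = (iterAdv s (m+4+1), winSpec s (m+4+1), patsSpec s (m+4+1))
      simp [winSpec, patsSpec, keyOf, patsStep, df, dg, iterAdv, show m+4+1 = m+1+4 from rfl]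

-- invariant of B's first pass
theorem bFold_spec (s : Int) (n : Nat) :
    (PySem.List.pyRange 0 (n : Int) 1).foldl
      (fun (st : List Int × Int) _ =>
        let t := pyAdvance st.2
        (st.1 ++ [pyLastDigit t], t))
      ([pyLastDigit s], s)
    = ((List.range (n+1)).map (dg s), iterAdv s n) := by
  induction n with
  | zero => simp [PySem.List.pyRange_one_eq_nil, iterAdv, dg, List.range_succ]
  | succ k ih =>
    have hcast : ((k+1 : Nat) : Int) = (k : Int) + 1 := by push_cast; ring
    rw [hcast, PySem.List.pyRange_one_succ_right (by positivity), List.foldl_append, ih]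
    simp [List.range_succ, dg, iterAdv]

theorem price_get (s : Int) (N j : Nat) (h : j < N + 1) :
    PySem.List.pyGetD ((List.range (N+1)).map (dg s)) ((j : Nat) : Int) 0 = dg s j := by
  simp [PySem.List.pyGetD_natCast, List.getD, h]

-- invariant of B's second pass, over the precomputed price list
theorem bScan_spec (s : Int) (N m : Nat) (h3 : 3 ≤ m) (hm : m ≤ N) :
    (PySem.List.pyRange 4 ((m:Int)+1) 1).foldl
      (fun pats i =>
        let key := [PySem.List.pyGetD ((List.range (N+1)).map (dg s)) (i-3) 0 - PySem.List.pyGetD ((List.range (N+1)).map (dg s)) (i-4) 0,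
                    PySem.List.pyGetD ((List.range (N+1)).map (dg s)) (i-2) 0 - PySem.List.pyGetD ((List.range (N+1)).map (dg s)) (i-3) 0,
                    PySem.List.pyGetD ((List.range (N+1)).map (dg s)) (i-1) 0 - PySem.List.pyGetD ((List.range (N+1)).map (dg s)) (i-2) 0,
                    PySem.List.pyGetD ((List.range (N+1)).map (dg s)) i 0 - PySem.List.pyGetD ((List.range (N+1)).map (dg s)) (i-1) 0]
        pvDictSetIfAbsent pats key (PySem.List.pyGetD ((List.range (N+1)).map (dg s)) i 0))
      pvDictEmpty
    = patsSpec s m := by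
  induction m with
  | zero => omega
  | succ k ih =>
    rcases Nat.lt_or_ge k 3 with h | h
    · obtain rfl : k = 2 := by omega
      norm_num [PySem.List.pyRange_one_eq_nil, patsSpec]
    · have hk : (PySem.List.pyRange 4 ((k:Int)+1+1) 1) = PySem.List.pyRange 4 ((k:Int)+1) 1 ++ [(k:Int)+1] := by
        have := PySem.List.pyRange_one_succ_right (a := 4) (b := (k:Int)+1) (by omega)
        simpa using this
      push_cast
      rw [hk, List.foldl_append, ih h (by omega)]
      simp only [List.foldl_cons, List.foldl_nil]
      have e4 : (k:Int)+1 = ((k+1 : Nat) : Int) := by push_cast; ring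
      have e3 : (k:Int)+1-1 = ((k : Nat) : Int) := by omega
      have e2 : (k:Int)+1-2 = ((k-1 : Nat) : Int) := by omega
      have e1 : (k:Int)+1-3 = ((k-2 : Nat) : Int) := by omega
      have e0 : (k:Int)+1-4 = ((k-3 : Nat) : Int) := by omega
      rw [e3, e2, e1, e0, e4,
          price_get s N (k+1) (by omega), price_get s N k (by omega),
          price_get s N (k-1) (by omega), price_get s N (k-2) (by omega),
          price_get s N (k-3) (by omega)]
      show _ = patsSpec s (k+1)
      have hstep : patsSpec s (k+1) = patsStep s (k+1) (patsSpec s k) := by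
        simp [patsSpec]; omega
      rw [hstep]
      unfold patsStep
      have hkey : keyOf s (k+1) = [dg s (k-2) - dg s (k-3), dg s (k-1) - dg s (k-2),
          dg s k - dg s (k-1), dg s (k+1) - dg s k] := by
        simp [keyOf, df, Nat.sub_sub]
      rw [hkey]

theorem bPrices_spec (s : Int) : bPrices s = (List.range 2001).map (dg s) := by
  have h := bFold_spec s 2000
  norm_num at h
  rw [bPrices]
  norm_num [h]

theorem bLocal_spec (s : Int) : bLocal (bPrices s) = patsSpec s 2000 := by
  rw [bLocal, bPrices_spec s]
  have h := bScan_spec s 2000 2000 (by norm_num) le_rfl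
  norm_num at h ⊢
  exact h

theorem inner_eq (s : Int) : aInner s = bLocal (bPrices s) := by
  rw [bLocal_spec]
  have h := aFold_spec s 2000
  norm_num at h
  rw [aInner]
  norm_num [h]

-- ===== VERDICT (by name: the statement is the Claim_ definition above) =====
theorem get_most_bananas_spec : Claim_equal_get_most_bananas := by
  intro secrets _ _
  unfold Spec_get_most_bananas get_most_bananas get_most_bananas_alt
  simp only [inner_eq]
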